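-- pv_equiv track=rewrite | github.com/Ricardokevins/Kevinpro-NLP-demo | Seq2Seq/preprocess.py | filter_punctuation
-- ===== SOURCE A (Python) =====
-- import string
--
-- punctuation_string = string.punctuation
--
-- def filter_punctuation(line):
--     line = line.lower()
--     for i in punctuation_string:
--         if i=="'":
--             line = line.replace(i, ' ')
--         else:
--             line = line.replace(i, '')
--     return line
-- ===== SOURCE B (Python) =====
-- import string
--
-- _PUNCT = frozenset(string.punctuation)
--
-- def filter_punctuation(line):
--     out = []
--     for ch in line.lower():
--         if ch == "'":
--             out.append(' ')
--         elif ch in _PUNCT: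
--             pass
--         else:
--             out.append(ch)
--     return ''.join(out)
-- ===== Notes on version B (the rewrite author's own statement) =====
-- stated objective: alternative
-- what changed: Replaces A's 32 full-line str.replace passes (one per punctuation character) with a single pass over the lowercased line that consults a precomputed frozenset per character.
import Mathlib
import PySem

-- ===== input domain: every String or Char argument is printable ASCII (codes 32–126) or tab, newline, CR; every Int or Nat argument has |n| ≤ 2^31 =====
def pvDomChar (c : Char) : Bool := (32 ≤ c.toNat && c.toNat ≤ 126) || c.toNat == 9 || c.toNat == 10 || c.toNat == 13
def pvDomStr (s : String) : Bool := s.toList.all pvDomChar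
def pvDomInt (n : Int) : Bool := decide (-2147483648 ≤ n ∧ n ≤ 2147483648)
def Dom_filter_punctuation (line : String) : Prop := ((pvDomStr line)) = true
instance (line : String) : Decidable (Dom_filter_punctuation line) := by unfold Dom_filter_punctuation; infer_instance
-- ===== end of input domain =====

set_option maxRecDepth 4096


-- B does the same cleaning in one pass instead of 32 whole-line replace scans: lowercase once,
-- then per character emit ' ' for an apostrophe, nothing for any other punctuation character,
-- and the character unchanged otherwise (alternative single-pass structure).

-- ===== PORT A =====
def punctuation_string : String := "!\"#$%&'()*+,-./:;<=>?@[\\]^_`{|}~"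

-- A: line = line.lower(); for i in punctuation_string: replace i by ' ' (apostrophe) or '' (others)
def filter_punctuation (line : String) : String :=
  punctuation_string.toList.foldl
    (fun l i =>
      if i = '\'' then PySem.Str.replace l (String.mk [i]) " "
      else PySem.Str.replace l (String.mk [i]) "")
    (PySem.Str.lower line)

-- ===== PORT B =====
-- the distinct punctuation characters, as a set (frozenset(string.punctuation))
def punctSet : PySem.Set Char := PySem.Set.ofList punctuation_string.toList

-- B: single pass over the lowered line, accumulating the kept pieces
def filter_punctuation_alt (line : String) : String :=
  String.mk ((PySem.Str.lower line).toList.foldl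
    (fun out ch =>
      if ch = '\'' then out ++ [' ']
      else if punctSet.contains ch then out
      else out ++ [ch]) [])

-- ===== PRECONDITION & SPEC =====
def Spec_filter_punctuation (line : String) (out : String) : Prop := out = filter_punctuation_alt line
instance (line : String) (out : String) : Decidable (Spec_filter_punctuation line out) := by unfold Spec_filter_punctuation; infer_instance

-- ===== CLAIM (what is proved, stated in full; the proofs are below) =====
def Claim_equal_filter_punctuation : Prop := ∀ (line : String), Dom_filter_punctuation line → Spec_filter_punctuation line (filter_punctuation line)

-- ===== LEMMAS AND PROOFS =====

-- per-character replacement for a single punctuation character p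
def repOne (p c : Char) : List Char := if c = p then (if p = '\'' then [' '] else []) else [c]

-- combined per-character action of the whole pass
def repAll (P : List Char) (c : Char) : List Char :=
  if c ∈ P then (if c = '\'' then [' '] else []) else [c]

lemma replace_go_single (p : Char) (new : List Char) :
    ∀ (l : List Char) (fuel : Nat) (acc : List Char), l.length ≤ fuel →
      PySem.Chars.replace.go [p] new fuel l acc
        = acc.reverse ++ l.flatMap (fun c => if c = p then new else [c]) := by
  intro l
  induction l with
  | nil =>
      intro fuel acc _
      cases fuel <;> simp [PySem.Chars.replace.go]
  | cons c t ih =>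
      intro fuel acc hf
      cases fuel with
      | zero => simp at hf
      | succ fuel =>
        have hpre : List.isPrefixOf [p] (c :: t) = (p == c) := by
          simp [List.isPrefixOf]
        rw [PySem.Chars.replace.go]
        rw [hpre]
        by_cases hc : c = p
        · subst hc
          simp only [beq_self_eq_true, if_true]
          rw [show List.drop (List.length [c]) (c :: t) = t from rfl]
          rw [ih _ _ (by simpa using Nat.le_of_succ_le_succ hf)]
          simp only [List.flatMap_cons, eq_self_iff_true, if_true, List.reverse_append,
            List.reverse_reverse, List.append_assoc]
        · have : (p == c) = false := beq_eq_false_iff_ne.mpr (Ne.symm hc)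
          rw [this]
          simp only [Bool.false_eq_true, if_false]
          rw [ih _ _ (by simpa using Nat.le_of_succ_le_succ hf)]
          simp only [List.flatMap_cons, if_neg hc, List.reverse_cons, List.append_assoc,
            List.singleton_append]

lemma replace_single (cs : List Char) (p : Char) (new : List Char) :
    PySem.Chars.replace cs [p] new = cs.flatMap (fun c => if c = p then new else [c]) := by
  rw [PySem.Chars.replace]
  simp [replace_go_single p new cs cs.length [] (le_refl _)]

-- the sequence of single-character replaces is one flatMap, as long as ' ' is never replaced
lemma foldl_replace_eq_flatMap (P : List Char) (hsp : ' ' ∉ P) :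
    ∀ cs : List Char,
      P.foldl (fun l i => PySem.Chars.replace l [i] (if i = '\'' then [' '] else [])) cs
        = cs.flatMap (repAll P) := by
  induction P with
  | nil =>
      intro cs
      have h : repAll [] = fun c => [c] := by funext c; simp [repAll]
      simp [h]
  | cons p P ih =>
      intro cs
      have hsp' : ' ' ∉ P := fun h => hsp (List.mem_cons_of_mem _ h)
      have hps : p ≠ ' ' := fun h => hsp (by simp [h])
      simp only [List.foldl_cons]
      rw [show PySem.Chars.replace cs [p] (if p = '\'' then [' '] else [])
            = cs.flatMap (repOne p) from replace_single cs p _]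
      rw [ih hsp', List.flatMap_assoc]
      apply List.flatMap_congr  -- pointwise
      intro c _
      by_cases hc : c = p
      · subst hc
        by_cases hq : c = '\''
        · simp [repOne, repAll, hq, hsp']
        · simp [repOne, repAll, hq]
      · by_cases hm : c ∈ P
        · simp [repOne, repAll, hc, hm]
        · simp [repOne, repAll, hc, hm]

-- B's accumulating loop is the same flatMap
lemma foldl_acc_eq_flatMap (P : List Char) (hq' : '\'' ∈ P) :
    ∀ (cs out : List Char),
      cs.foldl
        (fun out ch =>
          if ch = '\'' then out ++ [' ']
          else if (PySem.Set.ofList P).contains ch then out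
          else out ++ [ch]) out
        = out ++ cs.flatMap (repAll P) := by
  intro cs
  induction cs with
  | nil => intro out; simp
  | cons c t ih =>
      intro out
      simp only [List.foldl_cons, List.flatMap_cons]
      by_cases hq : c = '\'' <;> by_cases hm : c ∈ P <;>
        simp [hq, hm, hq', ih, repAll] <;> simp_all

-- A's string-level loop, moved to the list level
lemma toList_mk (l : List Char) : (String.mk l).toList = l :=
  Eq.symm (String.ofList_eq.mp rfl)

lemma foldl_strReplace_toList (P : List Char) :
    ∀ s : String,
      (P.foldl
        (fun l i =>
          if i = '\'' then PySem.Str.replace l (String.mk [i]) " "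
          else PySem.Str.replace l (String.mk [i]) "") s).toList
      = P.foldl (fun l i => PySem.Chars.replace l [i] (if i = '\'' then [' '] else [])) s.toList := by
  induction P with
  | nil => intro s; simp
  | cons p P ih =>
      intro s
      simp only [List.foldl_cons]
      by_cases hp : p = '\'' <;>
        simp [hp, ih, PySem.Str.toList_replace, toList_mk]

-- ===== VERDICT (by name: the statement is the Claim_ definition above) =====
theorem filter_punctuation_spec : Claim_equal_filter_punctuation := by
  intro line _
  unfold Spec_filter_punctuation filter_punctuation filter_punctuation_alt punctSet
  have hsp : ' ' ∉ punctuation_string.toList := by decide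
  rw [foldl_acc_eq_flatMap punctuation_string.toList (by decide) (PySem.Str.lower line).toList []]
  have hA := foldl_strReplace_toList punctuation_string.toList (PySem.Str.lower line)
  rw [foldl_replace_eq_flatMap punctuation_string.toList hsp] at hA
  apply String.toList_injective
  rw [hA]
  simp [toList_mk]
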